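-- pv_equiv track=rewrite | github.com/Kpeti962/alga | Feladatok/Rekurziv/Stone_Division_Revisited.py | stoneDivision
-- ===== SOURCE A (Python) =====
-- def stoneDivision(n, s):
--     memo = {};
--
--     def max_rakod(halmaz_meret):
--
--         if halmaz_meret in memo:
--             return memo[halmaz_meret];
--
--
--         max_rakod_szam = 0;
--
--
--         for x in s:
--             if halmaz_meret % x == 0 and x < halmaz_meret:
--                 halmaz_szam = halmaz_meret // x;
--                 moves = halmaz_szam * max_rakod(x) + 1;
--                 max_rakod_szam = max(max_rakod_szam, moves);
--
--         memo[halmaz_meret] = max_rakod_szam;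
--         return max_rakod_szam;
--
--     return max_rakod(n);
-- ===== SOURCE B (Python) =====
-- def stoneDivision(n, s):
--     dp = {}
--     for x in sorted(set(s)):
--         best = 0
--         for y in s:
--             if x % y == 0 and y < x:
--                 best = max(best, (x // y) * dp[y] + 1)
--         dp[x] = best
--     best = 0
--     for y in s:
--         if n % y == 0 and y < n:
--             best = max(best, (n // y) * dp[y] + 1)
--     return best
-- ===== Notes on version B (the rewrite author's own statement) =====
-- stated objective: alternative
-- what changed: Replaces A's memoized top-down recursion (a nested closure caching results in a dict) by an iterative bottom-up dynamic program: sort the distinct divisor values and fill a dp table in increasing order, then evaluate n against the finished table.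
import Mathlib
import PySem

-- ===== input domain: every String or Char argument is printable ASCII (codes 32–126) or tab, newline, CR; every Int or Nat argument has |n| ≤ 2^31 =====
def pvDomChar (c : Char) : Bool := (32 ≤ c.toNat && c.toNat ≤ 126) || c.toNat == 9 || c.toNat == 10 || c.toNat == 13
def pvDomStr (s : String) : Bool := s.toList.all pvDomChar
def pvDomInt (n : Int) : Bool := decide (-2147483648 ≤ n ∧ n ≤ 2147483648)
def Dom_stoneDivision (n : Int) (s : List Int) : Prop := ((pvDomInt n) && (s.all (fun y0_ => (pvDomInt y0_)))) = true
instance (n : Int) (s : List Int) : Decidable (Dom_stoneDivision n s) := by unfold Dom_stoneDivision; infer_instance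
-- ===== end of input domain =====

-- B replaces A's memoized top-down recursion by a bottom-up DP over sorted(set(s)); equivalence of return values is proved on inputs with 0 ∉ s (0 ∈ s makes both Pythons raise ZeroDivisionError).

-- termination measure helper (cited in decreasing_by of both ports' recursions)
theorem pvMuLt {s : List Int} {x m : Int} (hx : x ∈ s) (hxm : x < m) :
    (s.filter (fun y => y < x)).length < (s.filter (fun y => y < m)).length := by
  simp only [← List.countP_eq_length_filter]
  induction s with
  | nil => cases hx
  | cons a t ih =>
    have hmono : t.countP (fun y => decide (y < x)) ≤ t.countP (fun y => decide (y < m)) := by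
      apply List.countP_mono_left
      intro y _ hy
      simpa using lt_trans (by simpa using hy) hxm
    rcases List.mem_cons.mp hx with rfl | hxt
    · simp only [List.countP_cons]
      have h1 : (decide (x < x)) = false := by simp
      have h2 : (decide (x < m)) = true := by simpa using hxm
      rw [h1, h2]; simp; omega
    · have ht := ih hxt
      simp only [List.countP_cons] at *
      by_cases ha : a < x
      · have ham : a < m := lt_trans ha hxm
        simp [ha, ham] at *; omega
      · by_cases ham : a < m
        · simp [ha, ham] at *; omega
        · simp [ha, ham] at *; omega

-- ===== PORT A =====
mutual
def maxRakod (s : List Int) (memo : PySem.Dict Int Int) (m : Int) : Int × PySem.Dict Int Int :=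
  match memo.get? m with
  | some v => (v, memo)
  | none =>
      let p := rakodLoop s s memo m 0 (List.Subset.refl s)
      (p.1, p.2.insert m p.1)
termination_by ((s.filter (fun y => y < m)).length, s.length + 2)
decreasing_by exact Prod.Lex.right _ (by omega)

def rakodLoop (s : List Int) (rest : List Int) (memo : PySem.Dict Int Int) (m : Int)
    (acc : Int) (h : rest ⊆ s) : Int × PySem.Dict Int Int :=
  match rest with
  | [] => (acc, memo)
  | x :: r =>
      if PySem.Int.mod m x = 0 ∧ x < m then
        let p := maxRakod s memo x
        rakodLoop s r p.2 m (max acc (PySem.Int.floordiv m x * p.1 + 1))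
          (fun y hy => h (List.mem_cons_of_mem x hy))
      else
        rakodLoop s r memo m acc (fun y hy => h (List.mem_cons_of_mem x hy))
termination_by ((s.filter (fun y => y < m)).length, rest.length + 1)
decreasing_by
  · exact Prod.Lex.left _ _ (pvMuLt (h (List.mem_cons_self)) (by omega))
  · exact Prod.Lex.right _ (by simp only [List.length_cons]; omega)
  · exact Prod.Lex.right _ (by simp only [List.length_cons]; omega)
end

def stoneDivision (n : Int) (s : List Int) : Int :=
  (maxRakod s PySem.Dict.empty n).1

-- ===== PORT B =====
-- dp[y] in Python raises KeyError on a missing key; here getD y 0 — exact where the key is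
-- present, which the equivalence proof shows is always the case when the branch is taken.
def bInner (s : List Int) (dp : PySem.Dict Int Int) (m : Int) : Int :=
  s.foldl (fun best y =>
    if PySem.Int.mod m y = 0 ∧ y < m then
      max best (PySem.Int.floordiv m y * dp.getD y 0 + 1)
    else best) 0

def stoneDivision_alt (n : Int) (s : List Int) : Int :=
  let dp := (PySem.List.sorted (PySem.Set.ofList s) (fun x => x) false).foldl
      (fun dp x => dp.insert x (bInner s dp x)) PySem.Dict.empty
  bInner s dp n

-- ===== PRECONDITION & SPEC =====
-- Pre_ excludes lists containing 0, on which both Pythons raise ZeroDivisionError.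
def Pre_stoneDivision (n : Int) (s : List Int) : Prop := (0 : Int) ∉ s
instance (n : Int) (s : List Int) : Decidable (Pre_stoneDivision n s) := by
  unfold Pre_stoneDivision; infer_instance

def pvWitness_stoneDivision : Int × List Int := (6, [2, 3])

def Spec_stoneDivision (n : Int) (s : List Int) (out : Int) : Prop := out = stoneDivision_alt n s
instance (n : Int) (s : List Int) (out : Int) : Decidable (Spec_stoneDivision n s out) := by
  unfold Spec_stoneDivision; infer_instance

-- ===== CLAIM (what is proved, stated in full; the proofs are below) =====
def Claim_equal_stoneDivision : Prop := ∀ (n : Int) (s : List Int), Dom_stoneDivision n s → Pre_stoneDivision n s → Spec_stoneDivision n s (stoneDivision n s)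

-- ===== LEMMAS AND PROOFS =====

-- pure (memo-free) reference value of A's recursion
mutual
def pF (s : List Int) (m : Int) : Int :=
  pLoop s s m 0 (List.Subset.refl s)
termination_by ((s.filter (fun y => y < m)).length, s.length + 2)
decreasing_by exact Prod.Lex.right _ (by omega)

def pLoop (s : List Int) (rest : List Int) (m : Int) (acc : Int) (h : rest ⊆ s) : Int :=
  match rest with
  | [] => acc
  | x :: r =>
      if PySem.Int.mod m x = 0 ∧ x < m then
        pLoop s r m (max acc (PySem.Int.floordiv m x * pF s x + 1))
          (fun y hy => h (List.mem_cons_of_mem x hy))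
      else
        pLoop s r m acc (fun y hy => h (List.mem_cons_of_mem x hy))
termination_by ((s.filter (fun y => y < m)).length, rest.length + 1)
decreasing_by
  · exact Prod.Lex.left _ _ (pvMuLt (h (List.mem_cons_self)) (by omega))
  · exact Prod.Lex.right _ (by simp only [List.length_cons]; omega)
  · exact Prod.Lex.right _ (by simp only [List.length_cons]; omega)
end

def GoodMemo (s : List Int) (d : PySem.Dict Int Int) : Prop :=
  ∀ k v, d.get? k = some v → v = pF s k

theorem pvA_correct (s : List Int) : ∀ K : Nat, ∀ m : Int,
    (s.filter (fun y => y < m)).length < K →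
    (∀ rest (h : rest ⊆ s) memo acc, GoodMemo s memo →
      (rakodLoop s rest memo m acc h).1 = pLoop s rest m acc h ∧
      GoodMemo s (rakodLoop s rest memo m acc h).2) ∧
    (∀ memo, GoodMemo s memo →
      (maxRakod s memo m).1 = pF s m ∧ GoodMemo s (maxRakod s memo m).2) := by
  intro K
  induction K with
  | zero => intro m hm; exact absurd hm (by omega)
  | succ K ih =>
    intro m hm
    have hloop : ∀ rest (h : rest ⊆ s) memo acc, GoodMemo s memo →
        (rakodLoop s rest memo m acc h).1 = pLoop s rest m acc h ∧
        GoodMemo s (rakodLoop s rest memo m acc h).2 := by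
      intro rest
      induction rest with
      | nil => intro h memo acc hg; rw [rakodLoop, pLoop]; exact ⟨rfl, hg⟩
      | cons x r ihr =>
        intro h memo acc hg
        rw [rakodLoop, pLoop]
        by_cases hc : PySem.Int.mod m x = 0 ∧ x < m
        · rw [if_pos hc, if_pos hc]
          have hx : x ∈ s := h List.mem_cons_self
          have hmx : (s.filter (fun y => y < x)).length < K :=
            lt_of_lt_of_le (pvMuLt hx hc.2) (by omega)
          obtain ⟨h1, h2⟩ := (ih x hmx).2 memo hg
          show (rakodLoop s r (maxRakod s memo x).2 m
              (max acc (PySem.Int.floordiv m x * (maxRakod s memo x).1 + 1)) _).1 =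
              pLoop s r m (max acc (PySem.Int.floordiv m x * pF s x + 1)) _ ∧
            GoodMemo s (rakodLoop s r (maxRakod s memo x).2 m
              (max acc (PySem.Int.floordiv m x * (maxRakod s memo x).1 + 1)) _).2
          rw [h1]
          exact ihr _ _ _ h2
        · rw [if_neg hc, if_neg hc]
          exact ihr _ memo acc hg
    refine ⟨hloop, ?_⟩
    intro memo hg
    rw [maxRakod]
    cases hmemo : memo.get? m with
    | some v => exact ⟨hg m v hmemo, hg⟩
    | none =>
      obtain ⟨h1, h2⟩ := hloop s (List.Subset.refl s) memo 0 hg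
      show (rakodLoop s s memo m 0 _).1 = _ ∧ GoodMemo s
        ((rakodLoop s s memo m 0 _).2.insert m (rakodLoop s s memo m 0 _).1)
      refine ⟨by rw [pF]; exact h1, ?_⟩
      intro k v hkv
      by_cases hk : k = m
      · subst hk
        rw [PySem.Dict.get?_insert_self _ _ _] at hkv
        cases hkv
        rw [pF]; exact h1
      · rw [PySem.Dict.get?_insert_of_ne _ _ hk] at hkv
        exact h2 k v hkv

theorem pvB_inner (s : List Int) : ∀ rest (h : rest ⊆ s) (dp : PySem.Dict Int Int) (m acc : Int),
    (∀ y, y ∈ s → y < m → dp.get? y = some (pF s y)) →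
    rest.foldl (fun best y =>
      if PySem.Int.mod m y = 0 ∧ y < m then
        max best (PySem.Int.floordiv m y * dp.getD y 0 + 1)
      else best) acc = pLoop s rest m acc h := by
  intro rest
  induction rest with
  | nil => intro h dp m acc hdp; rw [pLoop]; rfl
  | cons x r ihr =>
    intro h dp m acc hdp
    rw [pLoop]
    simp only [List.foldl_cons]
    by_cases hc : PySem.Int.mod m x = 0 ∧ x < m
    · rw [if_pos hc, if_pos hc,
        PySem.Dict.getD_of_get?_eq_some dp 0 (hdp x (h List.mem_cons_self) hc.2)]
      exact ihr _ dp m _ hdp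
    · rw [if_neg hc, if_neg hc]
      exact ihr _ dp m acc hdp

theorem pvB_fold (s : List Int) :
    ∀ (Q P : List Int) (dp : PySem.Dict Int Int),
    PySem.List.sorted (PySem.Set.ofList s) (fun x => x) false = P ++ Q →
    (∀ y ∈ P, dp.get? y = some (pF s y)) →
    ∀ y ∈ PySem.List.sorted (PySem.Set.ofList s) (fun x => x) false,
      (Q.foldl (fun dp x => dp.insert x (bInner s dp x)) dp).get? y = some (pF s y) := by
  intro Q
  induction Q with
  | nil =>
    intro P dp hPQ hP y hy
    simp only [List.foldl_nil]
    exact hP y (by rw [hPQ, List.append_nil] at hy; exact hy)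
  | cons x Q' ihq =>
    intro P dp hPQ hP y hy
    have hpw : (PySem.List.sorted (PySem.Set.ofList s) (fun x => x) false).Pairwise (· < ·) :=
      PySem.List.sorted_ofList_pairwise_lt s
    rw [hPQ] at hpw
    have hbefore : ∀ z ∈ P, z < x := by
      intro z hz
      exact (List.pairwise_append.mp hpw).2.2 z hz x List.mem_cons_self
    have hval : bInner s dp x = pF s x := by
      rw [bInner, pF]
      apply pvB_inner s s (List.Subset.refl s) dp x 0
      intro z hzs hzx
      apply hP
      have hzL : z ∈ PySem.List.sorted (PySem.Set.ofList s) (fun x => x) false := by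
        rw [PySem.List.mem_sorted]
        exact (PySem.Set.mem_ofList _ _).mpr hzs
      rw [hPQ] at hzL
      rcases List.mem_append.mp hzL with hzP | hzQ
      · exact hzP
      · rcases List.mem_cons.mp hzQ with rfl | hzQ'
        · exact absurd hzx (lt_irrefl _)
        · have hxz := (List.pairwise_cons.mp (List.pairwise_append.mp hpw).2.1).1 z hzQ'
          exact absurd hxz (by omega)
    simp only [List.foldl_cons]
    apply ihq (P ++ [x]) _ (by rw [hPQ, List.append_assoc]; rfl) _ y hy
    intro z hz
    rcases List.mem_append.mp hz with hzP | hzx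
    · rw [PySem.Dict.get?_insert_of_ne _ _ (by have := hbefore z hzP; omega)]
      exact hP z hzP
    · rcases List.mem_cons.mp hzx with rfl | h'
      · rw [PySem.Dict.get?_insert_self _ _ _, hval]
      · cases h' 

-- ===== VERDICT (by name: the statement is the Claim_ definition above) =====
theorem stoneDivision_spec : Claim_equal_stoneDivision := by
  intro n s _ _
  unfold Spec_stoneDivision stoneDivision stoneDivision_alt
  have hgood : GoodMemo s PySem.Dict.empty := by
    intro k v hkv
    rw [PySem.Dict.get?_empty] at hkv
    cases hkv
  have hA : (maxRakod s PySem.Dict.empty n).1 = pF s n :=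
    ((pvA_correct s ((s.filter (fun y => y < n)).length + 1) n (by omega)).2
      PySem.Dict.empty hgood).1
  have hfold := pvB_fold s (PySem.List.sorted (PySem.Set.ofList s) (fun x => x) false)
      [] PySem.Dict.empty rfl (by intro y hy; cases hy)
  have hB : bInner s
      ((PySem.List.sorted (PySem.Set.ofList s) (fun x => x) false).foldl
        (fun dp x => dp.insert x (bInner s dp x)) PySem.Dict.empty) n = pF s n := by
    rw [bInner, pF]
    apply pvB_inner s s (List.Subset.refl s) _ n 0
    intro y hys hyn
    apply hfold
    rw [PySem.List.mem_sorted]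
    exact (PySem.Set.mem_ofList _ _).mpr hys
  rw [hA, hB]
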